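-- pv_equiv track=rewrite | github.com/harshaygadekar/chain-of-clarifications-v2 | agents/reasoner.py | _is_valid_answer
-- ===== SOURCE A (Python) =====
-- def _is_valid_answer(answer: str) -> bool:
--     """
--     Check if extracted answer is valid (not prompt-like).
--
--     Args:
--         answer: Candidate answer string
--
--     Returns:
--         True if answer appears valid
--     """
--     if not answer or len(answer) < 3:
--         return False
--
--     # Check if it looks like a prompt instruction
--     prompt_indicators = [
--         'your task is',
--         'you are a',
--         'carefully read',
--         'apply logical',
--         'formulate a',
--         'provide your',
--         'task:',
--         'question:',
--         'relevant information:',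
--     ]
--
--     answer_lower = answer.lower()
--     for indicator in prompt_indicators:
--         if indicator in answer_lower:
--             return False
--
--     return True
-- ===== SOURCE B (Python) =====
-- def _is_valid_answer(answer: str) -> bool:
--     """Single left-to-right pass: at each position test whether any indicator starts there."""
--     if not answer or len(answer) < 3:
--         return False
--
--     prompt_indicators = [
--         'your task is',
--         'you are a',
--         'carefully read',
--         'apply logical',
--         'formulate a',
--         'provide your',
--         'task:',
--         'question:',
--         'relevant information:',
--     ]
--
--     s = answer.lower()
--     return not any(s.startswith(ind, i)
--                    for i in range(len(s))
--                    for ind in prompt_indicators)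
-- ===== Notes on version B (the rewrite author's own statement) =====
-- stated objective: alternative
-- what changed: A scans the whole lowered string once per indicator (nine independent substring searches with early return); B makes a single left-to-right pass over positions and at each position checks whether any indicator starts there (prefix tests), folding the nine scans into one traversal.
import Mathlib
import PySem

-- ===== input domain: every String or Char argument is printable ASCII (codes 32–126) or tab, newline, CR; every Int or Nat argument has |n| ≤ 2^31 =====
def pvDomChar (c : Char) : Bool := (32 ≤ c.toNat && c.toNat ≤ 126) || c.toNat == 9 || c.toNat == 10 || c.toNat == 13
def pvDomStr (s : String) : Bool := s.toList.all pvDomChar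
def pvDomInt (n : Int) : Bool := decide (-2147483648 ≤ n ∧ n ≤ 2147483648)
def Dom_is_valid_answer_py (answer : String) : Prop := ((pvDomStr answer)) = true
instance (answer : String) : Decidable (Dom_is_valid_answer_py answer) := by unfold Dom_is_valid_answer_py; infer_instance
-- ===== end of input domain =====

-- B folds A's nine independent substring scans into one left-to-right pass
-- checking each position for an indicator prefix (alternative traversal, same cost).


-- ===== PORT A =====
def pvIndicatorsA : List String :=
  ["your task is", "you are a", "carefully read", "apply logical",
   "formulate a", "provide your", "task:", "question:", "relevant information:"]

-- the for-loop with early 'return False'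
def pvScanA (low : String) : List String → Bool
  | [] => true
  | ind :: rest => if PySem.Str.isIn ind low then false else pvScanA low rest

def is_valid_answer_py (answer : String) : Bool :=
  if answer.toList = [] || answer.toList.length < 3 then false
  else pvScanA (PySem.Str.lower answer) pvIndicatorsA

-- ===== PORT B =====
def pvIndicatorsB : List (List Char) :=
  ["your task is".toList, "you are a".toList, "carefully read".toList, "apply logical".toList,
   "formulate a".toList, "provide your".toList, "task:".toList, "question:".toList,
   "relevant information:".toList]

def is_valid_answer_py_alt (answer : String) : Bool :=
  if answer.toList = [] || answer.toList.length < 3 then false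
  else
    let s := PySem.Chars.lower answer.toList
    ! (List.range s.length).any (fun i =>
        pvIndicatorsB.any (fun ind => PySem.Chars.startswith (s.drop i) ind))

-- ===== PRECONDITION & SPEC =====
def Spec_is_valid_answer_py (answer : String) (out : Bool) : Prop := out = is_valid_answer_py_alt answer
instance (answer : String) (out : Bool) : Decidable (Spec_is_valid_answer_py answer out) := by unfold Spec_is_valid_answer_py; infer_instance

-- ===== CLAIM (what is proved, stated in full; the proofs are below) =====
def Claim_equal_is_valid_answer_py : Prop := ∀ (answer : String), Dom_is_valid_answer_py answer → Spec_is_valid_answer_py answer (is_valid_answer_py answer)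

-- ===== LEMMAS AND PROOFS =====

-- A's early-return loop is the negated 'any'
theorem pvScanA_eq_not_any (low : String) (inds : List String) :
    pvScanA low inds = ! inds.any (fun ind => PySem.Str.isIn ind low) := by
  induction inds with
  | nil => rfl
  | cons ind rest ih =>
    simp only [pvScanA, List.any_cons]
    cases hv : PySem.Str.isIn ind low
    · simp [ih]
    · simp

-- the position scan for one nonempty pattern is the substring test
theorem pvAnyPos_eq_isIn (sub s : List Char) (h : sub ≠ []) :
    (List.range s.length).any (fun i => PySem.Chars.startswith (s.drop i) sub)
      = PySem.Chars.isIn sub s := by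
  rw [Bool.eq_iff_iff]
  rw [← PySem.Chars.exists_prefix_drop_iff_isIn (sub := sub) (s := s)]
  simp only [List.any_eq_true, List.mem_range, PySem.Chars.startswith_iff]
  constructor
  · rintro ⟨i, _, hp⟩; exact ⟨i, hp⟩
  · rintro ⟨j, hp⟩
    by_cases hj : j < s.length
    · exact ⟨j, hj, hp⟩
    · exfalso
      have : s.drop j = [] := List.drop_eq_nil_of_le (by omega)
      rw [this, List.prefix_nil] at hp
      exact h hp

theorem pvInds_ne : ∀ ind ∈ pvIndicatorsB, ind ≠ [] := by decide

-- per-indicator agreement lets the two 'any's be swapped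
theorem pvSwap (s : List Char) :
    ((List.range s.length).any (fun i =>
        pvIndicatorsB.any (fun ind => PySem.Chars.startswith (s.drop i) ind)))
      = pvIndicatorsB.any (fun ind => PySem.Chars.isIn ind s) := by
  rw [Bool.eq_iff_iff]
  simp only [List.any_eq_true]
  constructor
  · rintro ⟨i, hi, ind, hm, hp⟩
    refine ⟨ind, hm, ?_⟩
    rw [← pvAnyPos_eq_isIn ind s (pvInds_ne ind hm)]
    exact List.any_eq_true.2 ⟨i, hi, hp⟩
  · rintro ⟨ind, hm, hin⟩
    rw [← pvAnyPos_eq_isIn ind s (pvInds_ne ind hm)] at hin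
    obtain ⟨i, hi, hp⟩ := List.any_eq_true.1 hin
    exact ⟨i, hi, ind, hm, hp⟩

-- ===== VERDICT (by name: the statement is the Claim_ definition above) =====
-- A's indicator list with String.isIn equals B's char-list indicators with Chars.isIn
theorem pvInds_match (low : List Char) :
    pvIndicatorsA.any (fun ind => PySem.Str.isIn ind (String.ofList low))
      = pvIndicatorsB.any (fun ind => PySem.Chars.isIn ind low) := by
  simp [pvIndicatorsA, pvIndicatorsB, PySem.Str.isIn]

theorem is_valid_answer_py_spec : Claim_equal_is_valid_answer_py := by
  intro answer _
  unfold Spec_is_valid_answer_py is_valid_answer_py is_valid_answer_py_alt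
  by_cases hg : answer.toList.length < 3
  · have hc : (decide (answer.toList = []) || decide (answer.toList.length < 3)) = true := by
      simp only [Bool.or_eq_true, decide_eq_true_eq]
      exact Or.inr hg
    rw [if_pos hc, if_pos hc]
  · have hne : answer.toList ≠ [] := by intro h; rw [h] at hg; exact hg (by simp)
    have hc : ¬ ((decide (answer.toList = []) || decide (answer.toList.length < 3)) = true) := by
      simp only [Bool.or_eq_true, decide_eq_true_eq]
      rintro (h | h)
      · exact hne h
      · exact hg h
    rw [if_neg hc, if_neg hc]
    rw [pvScanA_eq_not_any]
    show _ = !(List.range (PySem.Chars.lower answer.toList).length).any (fun i =>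
        pvIndicatorsB.any (fun ind => PySem.Chars.startswith ((PySem.Chars.lower answer.toList).drop i) ind))
    rw [pvSwap]
    congr 1
    have hl : PySem.Str.lower answer = String.ofList (PySem.Chars.lower answer.toList) := by
      simp [PySem.Str.lower]
    rw [hl, pvInds_match]
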